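-- pv_equiv track=rewrite | github.com/bubei/constrained_decoding | constrained_decoding/server/__init__.py | convert_token_annotations_to_spans
-- ===== SOURCE A (Python) =====
-- def convert_token_annotations_to_spans(token_sequence, constraint_annotations):
--     assert len(token_sequence) == len(constraint_annotations), 'we need one annotation per token for this to make sense'
--     # here we are just annotating which spans are constraints, we discard the constraint alignment information
--
--     span_annotations = []
--     output_sequence = u''
--     constraint_id = None
--     constraint_start_idx = None
--     for token, annotation in zip(token_sequence, constraint_annotations):
--
--         if annotation is not None:
--             if annotation[0] != constraint_id:
--                 # we're starting a new constraint
--                 constraint_start_idx = len(output_sequence)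
--                 if len(output_sequence) > 0:
--                     # we'll add a whitespace before the constraint starts below
--                     constraint_start_idx += 1
--
--                 constraint_id = annotation[0]
--         else:
--             # a constraint just finished
--             if constraint_id is not None:
--                 span_annotations.append([constraint_start_idx, len(output_sequence)])
--                 constraint_id = None
--                 constraint_start_idx = None
--
--         if len(output_sequence) == 0:
--             output_sequence = token
--         else:
--             output_sequence = u'{} {}'.format(output_sequence, token)
--
--
--     return span_annotations, output_sequence
-- ===== SOURCE B (Python) =====
-- def convert_token_annotations_to_spans(token_sequence, constraint_annotations):
--     assert len(token_sequence) == len(constraint_annotations), 'we need one annotation per token for this to make sense'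
--     # build the joined string once, and a parallel table of each token's start offset
--     output_sequence = u' '.join(token_sequence)
--     token_starts = []
--     pos = 0
--     for token in token_sequence:
--         token_starts.append(pos)
--         pos += len(token) + 1
--     # span pass: offsets come from the start table, never from a growing string
--     span_annotations = []
--     constraint_id = None
--     constraint_start = None
--     for start, annotation in zip(token_starts, constraint_annotations):
--         if annotation is not None:
--             if annotation[0] != constraint_id:
--                 constraint_start = start
--                 constraint_id = annotation[0]
--         elif constraint_id is not None:
--             span_annotations.append([constraint_start, start - 1])
--             constraint_id = None
--             constraint_start = None
--     return span_annotations, output_sequence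
-- ===== Notes on version B (the rewrite author's own statement) =====
-- stated objective: faster
-- what changed: B joins the tokens once with ' '.join and derives all span offsets from a precomputed token-start offset table, instead of growing the output string token by token with repeated format() and reading its running length.
-- outside the precondition, e.g. on convert_token_annotations_to_spans(['', 'x'], [None, None]): A returns ([], 'x'), B returns ([], ' x')
import Mathlib
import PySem

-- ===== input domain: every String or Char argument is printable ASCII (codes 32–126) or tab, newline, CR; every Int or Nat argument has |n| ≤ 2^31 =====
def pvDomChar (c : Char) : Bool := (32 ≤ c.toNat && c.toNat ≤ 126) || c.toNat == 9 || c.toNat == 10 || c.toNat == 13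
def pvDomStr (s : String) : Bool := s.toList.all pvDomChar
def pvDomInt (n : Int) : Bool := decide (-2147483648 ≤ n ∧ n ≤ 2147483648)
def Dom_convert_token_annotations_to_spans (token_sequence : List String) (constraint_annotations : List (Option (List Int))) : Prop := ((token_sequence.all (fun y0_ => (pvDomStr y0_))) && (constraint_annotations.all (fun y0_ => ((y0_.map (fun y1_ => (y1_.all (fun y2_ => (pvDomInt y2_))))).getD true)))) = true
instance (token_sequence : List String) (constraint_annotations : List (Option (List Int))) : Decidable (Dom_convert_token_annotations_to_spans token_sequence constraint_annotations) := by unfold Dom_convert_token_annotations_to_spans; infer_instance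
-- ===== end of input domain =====

-- ===== PORT A =====
-- B replaces A's token-by-token string growth (and its running-length offsets) by one ' '.join plus a
-- precomputed token-start offset table; return-value equivalence only (neither mutates its arguments).

-- loop body of A: state = (span_annotations, output_sequence, constraint_id, constraint_start_idx)
def stepA (st : List (List Int) × String × Option Int × Option Int)
    (p : String × Option (List Int)) : List (List Int) × String × Option Int × Option Int :=
  let spans := st.1
  let out := st.2.1
  let cid := st.2.2.1
  let cst := st.2.2.2
  let s3 : List (List Int) × Option Int × Option Int :=
    match p.2 with
    | some annotation =>
        let a0 : Int := (PySem.List.pyGet? annotation 0).getD 0   -- annotation[0]; Pre_ excludes the empty annotation (IndexError)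
        if some a0 ≠ cid then
          -- starting a new constraint
          (spans, some a0,
            some (if 0 < PySem.Str.len out then (PySem.Str.len out : Int) + 1 else (PySem.Str.len out : Int)))
        else (spans, cid, cst)
    | none =>
        -- a constraint just finished
        if cid ≠ none then (spans ++ [[cst.getD 0, (PySem.Str.len out : Int)]], none, none)
        else (spans, cid, cst)
  let out' := if PySem.Str.len out = 0 then p.1 else out ++ " " ++ p.1   -- u'{} {}'.format(output_sequence, token)
  (s3.1, out', s3.2.1, s3.2.2)

def convert_token_annotations_to_spans (token_sequence : List String) (constraint_annotations : List (Option (List Int))) : List (List Int) × String :=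
  -- the assert (equal lengths) is Pre_'s to exclude
  let r := (token_sequence.zip constraint_annotations).foldl stepA ([], "", none, none)
  (r.1, r.2.1)

-- ===== PORT B =====
-- loop body of B's span pass: state = (span_annotations, constraint_id, constraint_start); p = (start, annotation)
def stepB (st : List (List Int) × Option Int × Option Int)
    (p : Int × Option (List Int)) : List (List Int) × Option Int × Option Int :=
  let spans := st.1
  let cid := st.2.1
  let cst := st.2.2
  match p.2 with
  | some annotation =>
      let a0 : Int := (PySem.List.pyGet? annotation 0).getD 0
      if some a0 ≠ cid then (spans, some a0, some p.1)
      else (spans, cid, cst)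
  | none =>
      if cid ≠ none then (spans ++ [[cst.getD 0, p.1 - 1]], none, none)
      else (spans, cid, cst)

def convert_token_annotations_to_spans_alt (token_sequence : List String) (constraint_annotations : List (Option (List Int))) : List (List Int) × String :=
  let output := PySem.Str.join " " token_sequence
  let starts := (token_sequence.foldl
      (fun (st : List Int × Int) token => (st.1 ++ [st.2], st.2 + (PySem.Str.len token : Int) + 1)) ([], 0)).1
  let r := (starts.zip constraint_annotations).foldl stepB ([], none, none)
  (r.1, output)

-- ===== PRECONDITION & SPEC =====
-- Pre_ excludes: unequal lengths (A's assert raises) and an empty annotation list (annotation[0] raises IndexError);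
-- and, where A still returns, sequences of length >= 2 whose first token is the empty string, on which A's
-- skip-the-separator-while-the-output-is-still-empty accumulation and a plain ' '.join are both defensible but differ.
def Pre_convert_token_annotations_to_spans (token_sequence : List String) (constraint_annotations : List (Option (List Int))) : Prop :=
  token_sequence.length = constraint_annotations.length ∧
  (∀ a ∈ constraint_annotations, a ≠ some []) ∧
  (token_sequence.length ≤ 1 ∨ token_sequence.head? ≠ some "")
instance (token_sequence : List String) (constraint_annotations : List (Option (List Int))) : Decidable (Pre_convert_token_annotations_to_spans token_sequence constraint_annotations) := by unfold Pre_convert_token_annotations_to_spans; infer_instance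

def pvWitness_convert_token_annotations_to_spans : List String × List (Option (List Int)) :=
  (["the", "big", "dog"], [none, some [1], some [1]])

def Spec_convert_token_annotations_to_spans (token_sequence : List String) (constraint_annotations : List (Option (List Int))) (out : List (List Int) × String) : Prop := out = convert_token_annotations_to_spans_alt token_sequence constraint_annotations
instance (token_sequence : List String) (constraint_annotations : List (Option (List Int))) (out : List (List Int) × String) : Decidable (Spec_convert_token_annotations_to_spans token_sequence constraint_annotations out) := by unfold Spec_convert_token_annotations_to_spans; infer_instance

-- ===== CLAIM (what is proved, stated in full; the proofs are below) =====
def Claim_equal_convert_token_annotations_to_spans : Prop := ∀ (token_sequence : List String) (constraint_annotations : List (Option (List Int))), Dom_convert_token_annotations_to_spans token_sequence constraint_annotations → Pre_convert_token_annotations_to_spans token_sequence constraint_annotations → Spec_convert_token_annotations_to_spans token_sequence constraint_annotations (convert_token_annotations_to_spans token_sequence constraint_annotations)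

-- ===== LEMMAS AND PROOFS =====

-- proof-side view of B's start-offset table
def startsFrom : List String → Int → List Int
  | [], _ => []
  | t :: r, pos => pos :: startsFrom r (pos + (PySem.Str.len t : Int) + 1)

lemma starts_acc (ts : List String) (acc : List Int) (pos : Int) :
    (ts.foldl (fun (st : List Int × Int) token => (st.1 ++ [st.2], st.2 + (PySem.Str.len token : Int) + 1)) (acc, pos)).1
      = acc ++ startsFrom ts pos := by
  induction ts generalizing acc pos with
  | nil => simp [startsFrom]
  | cons t r ih =>
    rw [List.foldl_cons, ih]
    simp [startsFrom]

-- A's output-string accumulation, isolated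
def outAcc (out : String) (ts : List String) : String :=
  ts.foldl (fun o t => if PySem.Str.len o = 0 then t else o ++ " " ++ t) out

lemma step_eq (spans : List (List Int)) (cid cst : Option Int) (out : String) (pos : Int)
    (t : String) (a : Option (List Int))
    (h : (out.toList = [] ∧ pos = 0 ∧ cid = none) ∨
         (out.toList ≠ [] ∧ (out.toList.length : Int) = pos - 1)) :
    stepA (spans, out, cid, cst) (t, a) =
      ((stepB (spans, cid, cst) (pos, a)).1,
       (if PySem.Str.len out = 0 then t else out ++ " " ++ t),
       (stepB (spans, cid, cst) (pos, a)).2.1,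
       (stepB (spans, cid, cst) (pos, a)).2.2) := by
  rcases h with ⟨h1, h2, h3⟩ | ⟨h1, h2⟩
  · have ho : out = "" := String.toList_eq_nil_iff.mp h1
    subst ho; subst h3; subst h2
    cases a with
    | none => simp [stepA, stepB]
    | some ann => simp [stepA, stepB]
  · have h0 : out.length ≠ 0 := by rw [← String.length_toList]; simpa using h1
    have hpos : (out.length : Int) = pos - 1 := by rw [← String.length_toList]; exact h2
    have hlt : 0 < out.length := Nat.pos_of_ne_zero h0
    cases a with
    | none =>
      cases cid with
      | none => simp [stepA, stepB]
      | some c =>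
        simp [stepA, stepB, h0]
        omega
    | some ann =>
      by_cases hc : some ((PySem.List.pyGet? ann 0).getD 0) ≠ cid
      · simp [stepA, stepB, hc, h0, hlt]
        omega
      · simp [stepA, stepB, hc, h0]

lemma main_loop (ts : List String) (ans : List (Option (List Int)))
    (spans : List (List Int)) (cid cst : Option Int) (out : String) (pos : Int)
    (hlen : ts.length = ans.length)
    (hinv : (out.toList = [] ∧ pos = 0 ∧ cid = none ∧ (∀ t r, ts = t :: r → r ≠ [] → t.toList ≠ [])) ∨
            (out.toList ≠ [] ∧ (out.toList.length : Int) = pos - 1)) :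
    (ts.zip ans).foldl stepA (spans, out, cid, cst) =
      ((((startsFrom ts pos).zip ans).foldl stepB (spans, cid, cst)).1,
       outAcc out ts,
       (((startsFrom ts pos).zip ans).foldl stepB (spans, cid, cst)).2.1,
       (((startsFrom ts pos).zip ans).foldl stepB (spans, cid, cst)).2.2) := by
  induction ts generalizing ans spans cid cst out pos with
  | nil =>
    cases ans with
    | nil => simp [startsFrom, outAcc]
    | cons a ar => simp at hlen
  | cons t tr ih =>
    cases ans with
    | nil => simp at hlen
    | cons a ar =>
      have hlen' : tr.length = ar.length := by simpa using hlen
      have hstep := step_eq spans cid cst out pos t a (by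
        rcases hinv with ⟨h1, h2, h3, _⟩ | hr
        · exact Or.inl ⟨h1, h2, h3⟩
        · exact Or.inr hr)
      rw [startsFrom]
      simp only [List.zip_cons_cons, List.foldl_cons]
      rw [hstep]
      by_cases hout : out.toList = []
      · have ho : out = "" := String.toList_eq_nil_iff.mp hout
        subst ho
        rcases hinv with ⟨_, h2, _, h4⟩ | ⟨h1, _⟩
        · subst h2
          by_cases ht : t.toList = []
          · have htr : tr = [] := by
              by_contra hne; exact (h4 t tr rfl hne) ht
            have ht' : t = "" := String.toList_eq_nil_iff.mp ht
            subst htr; subst ht'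
            have har : ar = [] := List.length_eq_zero_iff.mp hlen'.symm
            subst har
            simp [startsFrom, outAcc]
          · exact ih ar _ _ _ _ _ hlen' (Or.inr (by
              constructor
              · simpa using ht
              · simp [PySem.Str.len_eq]))
        · exact absurd rfl h1
      · have h2 : (out.toList.length : Int) = pos - 1 := by
          rcases hinv with ⟨h1, _⟩ | ⟨_, h2⟩
          · exact absurd h1 hout
          · exact h2
        have hne : PySem.Str.len out ≠ 0 := by
          simp only [PySem.Str.len_eq, String.length_toList]
          rw [← String.length_toList]
          simpa using hout
        have h2' : (out.length : Int) = pos - 1 := by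
          rw [← String.length_toList]; exact h2
        exact ih ar _ _ _ _ _ hlen' (Or.inr (by
          rw [if_neg hne]
          constructor
          · simp
          · simp only [PySem.Str.len_eq, String.length_toList, String.toList_append,
              List.length_append]
            have hsp : (" " : String).length = 1 := rfl
            rw [hsp]
            push_cast
            omega))

lemma outAcc_toList (rest : List String) (out : String) (h : out.toList ≠ []) :
    (outAcc out rest).toList = out.toList ++ rest.flatMap (fun u => ' ' :: u.toList) := by
  induction rest generalizing out with
  | nil => simp [outAcc]
  | cons u r ih =>
    have hne : PySem.Str.len out ≠ 0 := by
      simp only [PySem.Str.len_eq, String.length_toList]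
      rw [← String.length_toList]
      simpa using h
    have hstep : outAcc out (u :: r) = outAcc (if PySem.Str.len out = 0 then u else out ++ " " ++ u) r := rfl
    rw [hstep, if_neg hne, ih (out ++ " " ++ u) (by simp)]
    simp

lemma chars_join (ts : List String) (t : String) :
    PySem.Chars.join [' '] ((t :: ts).map String.toList) = t.toList ++ ts.flatMap (fun u => ' ' :: u.toList) := by
  induction ts generalizing t with
  | nil => simp [PySem.Chars.join_singleton]
  | cons u r ih =>
    simp only [List.map_cons] at ih ⊢
    rw [PySem.Chars.join_cons_cons, ih]
    simp

lemma join_eq_outAcc (ts : List String)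
    (hhd : ∀ t r, ts = t :: r → r ≠ [] → t.toList ≠ []) :
    outAcc "" ts = PySem.Str.join " " ts := by
  rw [← String.toList_inj]
  cases ts with
  | nil => simp [outAcc, PySem.Str.toList_join, PySem.Chars.join_nil]
  | cons t r =>
    have h1 : outAcc "" (t :: r) = outAcc t r := by
      simp [outAcc, List.foldl_cons, PySem.Str.len_eq]
    rw [h1, PySem.Str.toList_join]
    have h2 : (" " : String).toList = [' '] := rfl
    rw [h2, chars_join]
    cases r with
    | nil => simp [outAcc]
    | cons u rr =>
      rw [outAcc_toList _ _ (hhd t (u :: rr) rfl (by simp))]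

-- ===== VERDICT (by name: the statement is the Claim_ definition above) =====
theorem convert_token_annotations_to_spans_spec : Claim_equal_convert_token_annotations_to_spans := by
  intro ts ans hdom hpre
  unfold Spec_convert_token_annotations_to_spans
  obtain ⟨hlen, hni, hhd⟩ := hpre
  have hhd' : ∀ t r, ts = t :: r → r ≠ [] → t.toList ≠ [] := by
    intro t r hts hr
    rcases hhd with hle | hne
    · exfalso
      subst hts
      cases r with
      | nil => exact hr rfl
      | cons u rr => simp at hle
    · subst hts
      simp only [List.head?_cons, ne_eq, Option.some.injEq] at hne
      simpa [String.toList_eq_nil_iff] using hne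
  unfold convert_token_annotations_to_spans convert_token_annotations_to_spans_alt
  rw [main_loop ts ans [] none none "" 0 hlen (Or.inl ⟨rfl, rfl, rfl, hhd'⟩)]
  rw [starts_acc]
  simp only [List.nil_append]
  rw [join_eq_outAcc ts hhd']
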